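-- pv_equiv track=rewrite | github.com/chrisbubernak/ProjectEulerChallenges | 54_PokerHands.py | nOfAKindVal
-- ===== SOURCE A (Python) =====
-- cardValues = { 'A': 14, 'K': 13, 'Q': 12, 'J': 11, 'T': 10}
--
-- def value(card):
--   val = card[0]
--   if val in cardValues:
--      return cardValues[val]
--   return int(card[0])
--
-- def nOfAKindVal(cards, n):
--   vals = dict()
--   for card in cards:
--     v = value(card)
--     if not(v in vals):
--       vals[v] = 0
--     vals[v] = vals[v] + 1
--   for v in vals:
--     if (vals[v] == n):
--       return v
--   # error!
--   return -1
-- ===== SOURCE B (Python) =====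
-- cardValues = { 'A': 14, 'K': 13, 'Q': 12, 'J': 11, 'T': 10}
--
-- def value(card):
--   val = card[0]
--   if val in cardValues:
--      return cardValues[val]
--   return int(card[0])
--
-- def nOfAKindVal(cards, n):
--   # no frequency table: for each card in order, count its value by a scan of the whole hand
--   for card in cards:
--     v = value(card)
--     if sum(1 for c in cards if value(c) == v) == n:
--       return v
--   return -1
-- ===== Notes on version B (the rewrite author's own statement) =====
-- stated objective: simpler
-- what changed: Drops A's frequency dict entirely: B scans the cards in order and, for each card's value, counts its occurrences by rescanning the hand, returning the first value whose count equals n (identical to A because dict insertion order is first-occurrence order).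
import Mathlib
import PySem

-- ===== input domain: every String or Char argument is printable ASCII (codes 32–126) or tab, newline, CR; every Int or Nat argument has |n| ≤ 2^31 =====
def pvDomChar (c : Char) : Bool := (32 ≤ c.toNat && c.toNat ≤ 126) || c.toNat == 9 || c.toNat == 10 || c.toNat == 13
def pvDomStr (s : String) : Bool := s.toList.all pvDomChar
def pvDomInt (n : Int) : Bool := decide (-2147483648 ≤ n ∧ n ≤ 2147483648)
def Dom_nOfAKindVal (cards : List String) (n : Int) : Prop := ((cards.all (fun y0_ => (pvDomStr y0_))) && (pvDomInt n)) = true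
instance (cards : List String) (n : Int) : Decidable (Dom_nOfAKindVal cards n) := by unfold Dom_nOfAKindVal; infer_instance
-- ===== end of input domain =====

-- B drops A's frequency dict: it rescans the whole hand to count each card's value in order (same return value; no speed claim).


-- ===== PORT A =====
-- value(card): card[0] looked up in cardValues, else int(card[0]); none exactly where Python raises
def cardVal? (card : String) : Option Int :=
  match PySem.Str.pyGet? card 0 with
  | none => none
  | some c =>
    if c = 'A' then some 14
    else if c = 'K' then some 13
    else if c = 'Q' then some 12
    else if c = 'J' then some 11
    else if c = 'T' then some 10
    else PySem.Int.ofChars? [c]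

def nOfAKindVal (cards : List String) (n : Int) : Int :=
  let vals : PySem.Dict Int Int :=
    cards.foldl (fun d card =>
      match cardVal? card with
      | none => d  -- Python raises here (outside Pre_)
      | some v =>
        let d' := if d.contains v then d else d.insert v 0
        d'.insert v (d'.getD v 0 + 1)) PySem.Dict.empty
  match vals.keys.find? (fun v => vals.getD v 0 == n) with
  | some v => v
  | none => -1

-- ===== PORT B =====
def altLoop (all : List String) (n : Int) : List String → Int
  | [] => -1
  | card :: rest =>
    match cardVal? card with
    | none => 0  -- Python raises here (outside Pre_)
    | some v =>
      if (all.countP (fun c => cardVal? c == some v) : Int) = n then v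
      else altLoop all n rest

def nOfAKindVal_alt (cards : List String) (n : Int) : Int :=
  altLoop cards n cards

-- ===== PRECONDITION & SPEC =====
-- a card Python's value() accepts: non-empty, first char a face letter or a digit
def validCard (card : String) : Bool :=
  match card.toList with
  | [] => false
  | c :: _ => (decide (c ∈ (['A', 'K', 'Q', 'J', 'T'] : List Char)) || ('0' ≤ c && c ≤ '9'))

-- Pre_ excludes exactly the inputs where Python's value() raises: a card that is the
-- empty string (IndexError) or whose first character is neither a face letter nor a digit (ValueError).
def Pre_nOfAKindVal (cards : List String) (n : Int) : Prop :=
  cards.all validCard = true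
instance (cards : List String) (n : Int) : Decidable (Pre_nOfAKindVal cards n) := by
  unfold Pre_nOfAKindVal; infer_instance
def pvWitness_nOfAKindVal : List String × Int := (["AH", "AS", "3C", "3D", "3S"], 3)

def Spec_nOfAKindVal (cards : List String) (n : Int) (out : Int) : Prop := out = nOfAKindVal_alt cards n
instance (cards : List String) (n : Int) (out : Int) : Decidable (Spec_nOfAKindVal cards n out) := by unfold Spec_nOfAKindVal; infer_instance

-- ===== CLAIM (what is proved, stated in full; the proofs are below) =====
def Claim_equal_nOfAKindVal : Prop := ∀ (cards : List String) (n : Int), Dom_nOfAKindVal cards n → Pre_nOfAKindVal cards n → Spec_nOfAKindVal cards n (nOfAKindVal cards n)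

-- ===== LEMMAS AND PROOFS =====

-- the total value of a valid card (proof-only)
def pval (card : String) : Int := (cardVal? card).getD 0

lemma digit_mem (c : Char) (h1 : '0' ≤ c) (h2 : c ≤ '9') :
    c ∈ (['0', '1', '2', '3', '4', '5', '6', '7', '8', '9'] : List Char) := by
  have h1' : 48 ≤ c.toNat := by simpa [Char.le_def, UInt32.le_iff_toNat_le] using h1
  have h2' : c.toNat ≤ 57 := by simpa [Char.le_def, UInt32.le_iff_toNat_le] using h2
  have hc : Char.ofNat c.toNat = c := Char.ofNat_toNat c
  interval_cases h : c.toNat <;> rw [← hc] <;> decide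

lemma cardVal?_eq_some (card : String) (h : validCard card = true) :
    cardVal? card = some (pval card) := by
  have hs : (cardVal? card).isSome = true := by
    unfold validCard at h
    cases htl : card.toList with
    | nil => rw [htl] at h; simp at h
    | cons c rest =>
      rw [htl] at h
      have hget : PySem.Str.pyGet? card 0 = some c := by
        simp [PySem.Str.pyGet?, PySem.List.pyGet?, PySem.List.pyIdx?, htl]
      unfold cardVal?
      rw [hget]
      simp only [Bool.or_eq_true, Bool.and_eq_true, decide_eq_true_eq] at h
      rcases h with hmem | ⟨h1, h2⟩
      · simp only [List.mem_cons] at hmem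
        rcases hmem with rfl | rfl | rfl | rfl | rfl | h'
        · decide
        · decide
        · decide
        · decide
        · decide
        · simp at h'
      · have := digit_mem c h1 h2
        simp only [List.mem_cons] at this
        rcases this with rfl | rfl | rfl | rfl | rfl | rfl | rfl | rfl | rfl | rfl | h'
        all_goals first | decide | simp at h'
  cases ho : cardVal? card with
  | none => rw [ho] at hs; simp at hs
  | some v => unfold pval; rw [ho]; rfl

lemma stepA (d : PySem.Dict Int Int) (v : Int) :
    (if d.contains v then d else d.insert v 0).insert v
      ((if d.contains v then d else d.insert v 0).getD v 0 + 1)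
    = d.insert v (d.getD v 0 + 1) := by
  cases h : d.contains v
  · simp only [Bool.false_eq_true, if_false]
    rw [PySem.Dict.getD_insert_self, PySem.Dict.insert_insert_self,
        PySem.Dict.getD_of_not_contains d 0 h]
  · simp

lemma foldA_eq (cards : List String) (h : ∀ card ∈ cards, validCard card = true)
    (d : PySem.Dict Int Int) :
    cards.foldl (fun d card =>
      match cardVal? card with
      | none => d
      | some v =>
        let d' := if d.contains v then d else d.insert v 0
        d'.insert v (d'.getD v 0 + 1)) d
    = (cards.map pval).foldl (fun d v => d.insert v (d.getD v 0 + 1)) d := by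
  induction cards generalizing d with
  | nil => rfl
  | cons card cards ih =>
    simp only [List.foldl_cons, List.map_cons]
    rw [cardVal?_eq_some card (h card (List.mem_cons_self ..))]
    dsimp only []
    rw [stepA]
    exact ih (fun c hc => h c (List.mem_cons_of_mem _ hc)) _

lemma find?_filter_ne (p : Int → Bool) (x : Int) (hx : p x = false) (l : List Int) :
    (l.filter (fun y => !(y == x))).find? p = l.find? p := by
  induction l with
  | nil => rfl
  | cons y l ih =>
    by_cases hyx : y = x
    · subst hyx
      simp only [List.filter_cons, BEq.rfl, Bool.not_true, List.find?_cons, hx]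
      exact ih
    · have : (!(y == x)) = true := by simp [hyx]
      simp only [List.filter_cons, this, if_true, List.find?_cons]
      cases hp : p y
      · exact ih
      · rfl

lemma find?_ofList (p : Int → Bool) (xs : List Int) :
    (PySem.Set.ofList xs).find? p = xs.find? p := by
  induction xs with
  | nil => rfl
  | cons x xs ih =>
    rw [PySem.Set.ofList_cons, List.find?_cons, List.find?_cons]
    cases hp : p x
    · show ((PySem.Set.ofList xs).discard x).find? p = _
      unfold PySem.Set.discard
      rw [find?_filter_ne p x hp]
      exact ih
    · rfl

lemma altLoop_eq (cards : List String) (n : Int) (hall : ∀ card ∈ cards, validCard card = true)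
    (rest : List String) (hrest : ∀ card ∈ rest, validCard card = true) :
    altLoop cards n rest
      = ((rest.map pval).find? (fun v => ((cards.map pval).count v : Int) == n)).getD (-1) := by
  induction rest with
  | nil => rfl
  | cons card rest ih =>
    have hc := cardVal?_eq_some card (hrest card (List.mem_cons_self ..))
    have hcount : cards.countP (fun c => cardVal? c == some (pval card))
        = (cards.map pval).count (pval card) := by
      rw [List.count_eq_countP, List.countP_map]
      apply List.countP_congr
      intro c hcmem
      rw [cardVal?_eq_some c (hall c hcmem)]
      simp
    simp only [altLoop, hc, List.map_cons, List.find?_cons]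
    cases hn : (((cards.map pval).count (pval card) : Int) == n)
    · have hne : ¬ ((cards.countP (fun c => cardVal? c == some (pval card)) : Int) = n) := by
        rw [hcount]; exact of_decide_eq_false (by simpa using hn)
      rw [if_neg hne]
      exact ih (fun c hc => hrest c (List.mem_cons_of_mem _ hc))
    · have heq : ((cards.countP (fun c => cardVal? c == some (pval card)) : Int) = n) := by
        rw [hcount]; exact of_decide_eq_true (by simpa using hn)
      rw [if_pos heq]
      rfl

-- ===== VERDICT (by name: the statement is the Claim_ definition above) =====
theorem nOfAKindVal_spec : Claim_equal_nOfAKindVal := by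
  intro cards n _ hpre
  have hall : ∀ card ∈ cards, validCard card = true := by
    intro c hc
    exact List.all_eq_true.mp hpre c hc
  show nOfAKindVal cards n = nOfAKindVal_alt cards n
  unfold nOfAKindVal nOfAKindVal_alt
  rw [foldA_eq cards hall, PySem.Dict.foldl_insert_getD_add_one_eq_counter,
      altLoop_eq cards n hall cards hall]
  simp only [PySem.Dict.keys_counter, PySem.Dict.getD_counter]
  rw [find?_ofList]
  cases hf : (cards.map pval).find? (fun v => ((cards.map pval).count v : Int) == n) with
  | none => rfl
  | some v => rfl
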